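-- pv_equiv track=rewrite | github.com/victoriaquirogaa/la-shamona | backend/routers/online.py | obtener_cadena_de_tragos
-- ===== SOURCE A (Python) =====
-- def obtener_cadena_de_tragos(victima, mascotas_dict):
--     """Devuelve una lista con la victima principal y todas sus mascotas en cadena"""
--     cadena = [victima]
--     procesados = {victima}
--     cola = [victima]
--
--     while cola:
--         actual = cola.pop(0)
--         for esclavo, dueno in mascotas_dict.items():
--             if dueno == actual and esclavo not in procesados:
--                 cadena.append(esclavo)
--                 cola.append(esclavo)
--                 procesados.add(esclavo)
--     return cadena
-- ===== SOURCE B (Python) =====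
-- def obtener_cadena_de_tragos(victima, mascotas_dict):
--     """Devuelve una lista con la victima principal y todas sus mascotas en cadena"""
--     # index the dict once: owner -> list of slaves (insertion order)
--     adj = {}
--     for esclavo, dueno in mascotas_dict.items():
--         adj.setdefault(dueno, []).append(esclavo)
--     # cadena doubles as the BFS queue: read with a cursor, append at the end
--     cadena = [victima]
--     procesados = {victima}
--     i = 0
--     while i < len(cadena):
--         actual = cadena[i]
--         i += 1
--         for esclavo in adj.get(actual, ()):
--             if esclavo not in procesados:
--                 procesados.add(esclavo)
--                 cadena.append(esclavo)
--     return cadena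
-- ===== Notes on version B (the rewrite author's own statement) =====
-- stated objective: faster
-- what changed: B precomputes an owner->slaves adjacency index once with setdefault and runs the BFS with a cursor into the output list itself (which doubles as the queue), instead of A's rescan of every dict item for every dequeued node and its O(n) list.pop(0).
import Mathlib
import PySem

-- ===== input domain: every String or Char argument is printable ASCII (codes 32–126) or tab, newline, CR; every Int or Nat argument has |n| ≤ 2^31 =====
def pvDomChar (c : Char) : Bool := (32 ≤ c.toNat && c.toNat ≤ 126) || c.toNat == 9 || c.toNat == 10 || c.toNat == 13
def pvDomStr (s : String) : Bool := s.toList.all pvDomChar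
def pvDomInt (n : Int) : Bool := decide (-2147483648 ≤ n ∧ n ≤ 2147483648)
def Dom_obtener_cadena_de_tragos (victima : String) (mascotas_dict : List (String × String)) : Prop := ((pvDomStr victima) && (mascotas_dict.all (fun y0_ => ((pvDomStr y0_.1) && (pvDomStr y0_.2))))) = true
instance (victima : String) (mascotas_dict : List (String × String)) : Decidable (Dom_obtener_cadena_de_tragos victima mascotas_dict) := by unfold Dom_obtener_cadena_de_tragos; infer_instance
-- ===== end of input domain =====

-- B replaces A's full dict scan per dequeued node by a precomputed owner→slaves index and
-- reuses the output list as the BFS queue via a cursor (objective: faster, asymptotic).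


-- ===== PORT A =====
-- A's inner for-loop: one full scan of the dict items for owner `a`
def obtener_cadena_de_tragos_scan (pairs : List (String × String)) (a : String)
    (st0 : List String × PySem.Set String × List String) :
    List String × PySem.Set String × List String :=
  pairs.foldl (fun st pr =>
      if pr.2 == a && !(PySem.Set.contains st.2.1 pr.1) then
        (st.1 ++ [pr.1], PySem.Set.add st.2.1 pr.1, st.2.2 ++ [pr.1])
      else st) st0

-- while cola: actual = cola.pop(0); scan ALL (esclavo, dueno) items for the unseen slaves of actual.
-- `fuel` only makes the loop total: every pop after the first consumes one element previously added
-- to `procesados` from the dict's keys, so `mascotas_dict.length + 1` iterations always suffice.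
def obtener_cadena_de_tragos_loop (pairs : List (String × String)) (cadena : List String)
    (procesados : PySem.Set String) (cola : List String) : Nat → List String
  | 0 => cadena
  | fuel + 1 =>
    match cola with
    | [] => cadena
    | actual :: rest =>
      let st := obtener_cadena_de_tragos_scan pairs actual (cadena, procesados, rest)
      obtener_cadena_de_tragos_loop pairs st.1 st.2.1 st.2.2 fuel

def obtener_cadena_de_tragos (victima : String) (mascotas_dict : List (String × String)) : List String :=
  obtener_cadena_de_tragos_loop mascotas_dict [victima] (PySem.Set.ofList [victima]) [victima]
    (mascotas_dict.length + 1)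

-- ===== PORT B =====
-- adj.setdefault(dueno, []).append(esclavo) over the dict items
def pvBuildAdj (pairs : List (String × String)) : PySem.Dict String (List String) :=
  pairs.foldl (fun d pr => d.modify pr.2 [] (fun l => l ++ [pr.1])) PySem.Dict.empty

-- B's inner for-loop over one adjacency entry
def obtener_cadena_de_tragos_alt_scan (L : List String)
    (st0 : List String × PySem.Set String) : List String × PySem.Set String :=
  L.foldl (fun st e =>
      if !(PySem.Set.contains st.2 e) then (st.1 ++ [e], PySem.Set.add st.2 e) else st) st0

-- while i < len(cadena): actual = cadena[i]; i += 1; extend cadena with the unseen adj.get(actual, ()).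
-- `fuel` only makes the loop total: each iteration past the first needs a previously appended distinct
-- key of the dict, so `mascotas_dict.length + 1` iterations always suffice.
def obtener_cadena_de_tragos_alt_loop (adj : PySem.Dict String (List String))
    (cadena : List String) (procesados : PySem.Set String) (i : Nat) : Nat → List String
  | 0 => cadena
  | fuel + 1 =>
    if h : i < cadena.length then
      let st := obtener_cadena_de_tragos_alt_scan (adj.getD cadena[i] []) (cadena, procesados)
      obtener_cadena_de_tragos_alt_loop adj st.1 st.2 (i + 1) fuel
    else cadena

def obtener_cadena_de_tragos_alt (victima : String) (mascotas_dict : List (String × String)) : List String :=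
  obtener_cadena_de_tragos_alt_loop (pvBuildAdj mascotas_dict) [victima] (PySem.Set.ofList [victima]) 0
    (mascotas_dict.length + 1)

-- ===== PRECONDITION & SPEC =====
def Spec_obtener_cadena_de_tragos (victima : String) (mascotas_dict : List (String × String)) (out : List String) : Prop := out = obtener_cadena_de_tragos_alt victima mascotas_dict
instance (victima : String) (mascotas_dict : List (String × String)) (out : List String) : Decidable (Spec_obtener_cadena_de_tragos victima mascotas_dict out) := by unfold Spec_obtener_cadena_de_tragos; infer_instance

-- ===== CLAIM (what is proved, stated in full; the proofs are below) =====
def Claim_equal_obtener_cadena_de_tragos : Prop := ∀ (victima : String) (mascotas_dict : List (String × String)), Dom_obtener_cadena_de_tragos victima mascotas_dict → Spec_obtener_cadena_de_tragos victima mascotas_dict (obtener_cadena_de_tragos victima mascotas_dict)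

-- ===== LEMMAS AND PROOFS =====

-- the elements a BFS step appends, as a function of the candidate list and the visited set
def pvNews : List String → List String → List String
  | [], _ => []
  | e :: L, p => if e ∈ p then pvNews L p else e :: pvNews L (p ++ [e])

-- slaves of a given owner, in dict order
def pvSlaves (pairs : List (String × String)) (a : String) : List String :=
  (pairs.filter (fun pr => pr.2 == a)).map Prod.fst

-- A's inner scan of the whole dict, characterised by pvNews
theorem pvFoldA (pairs : List (String × String)) (a : String) :
    ∀ (c q : List String) (p : PySem.Set String),
    obtener_cadena_de_tragos_scan pairs a (c, p, q)
      = (c ++ pvNews (pvSlaves pairs a) p, p ++ pvNews (pvSlaves pairs a) p,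
         q ++ pvNews (pvSlaves pairs a) p) := by
  unfold obtener_cadena_de_tragos_scan
  induction pairs with
  | nil => intro c q p; simp [pvSlaves, pvNews]
  | cons pr pairs ih =>
    intro c q p
    by_cases hd : pr.2 = a
    · by_cases hmem : pr.1 ∈ p
      · have hg : (pr.2 == a && !(PySem.Set.contains p pr.1)) = false := by simp [hd, hmem]
        rw [List.foldl_cons, if_neg (by simp [hmem])]
        have hs : pvSlaves (pr :: pairs) a = pr.1 :: pvSlaves pairs a := by
          simp [pvSlaves, hd]
        rw [hs]
        simp only [pvNews, if_pos hmem]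
        exact ih c q p
      · have hadd : PySem.Set.add p pr.1 = p ++ [pr.1] := PySem.Set.add_of_not_mem hmem
        have hg : (pr.2 == a && !(PySem.Set.contains p pr.1)) = true := by simp [hd, hmem]
        rw [List.foldl_cons, if_pos hg, hadd]
        have hs : pvSlaves (pr :: pairs) a = pr.1 :: pvSlaves pairs a := by
          simp [pvSlaves, hd]
        rw [hs]
        simp only [pvNews, if_neg hmem]
        rw [ih (c ++ [pr.1]) (q ++ [pr.1]) (p ++ [pr.1])]
        simp [List.append_assoc]
    · have hb : (pr.2 == a) = false := beq_eq_false_iff_ne.2 hd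
      rw [List.foldl_cons, if_neg (by simp [hb])]
      have hs : pvSlaves (pr :: pairs) a = pvSlaves pairs a := by
        simp [pvSlaves, hb]
      rw [hs]
      exact ih c q p

-- B's inner loop over the adjacency entry, characterised by the same pvNews
theorem pvFoldB : ∀ (L c : List String) (p : PySem.Set String),
    obtener_cadena_de_tragos_alt_scan L (c, p) = (c ++ pvNews L p, p ++ pvNews L p) := by
  intro L
  unfold obtener_cadena_de_tragos_alt_scan
  induction L with
  | nil => intro c p; simp [pvNews]
  | cons e L ih =>
    intro c p
    by_cases hmem : e ∈ p
    · rw [List.foldl_cons, if_neg (by simp [hmem])]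
      simp only [pvNews, if_pos hmem]
      exact ih c p
    · have hadd : PySem.Set.add p e = p ++ [e] := PySem.Set.add_of_not_mem hmem
      rw [List.foldl_cons, if_pos (by simp [hmem]), hadd]
      simp only [pvNews, if_neg hmem]
      rw [ih (c ++ [e]) (p ++ [e])]
      simp [List.append_assoc]

-- B's adjacency entry for a key is exactly the slaves A's scan would collect for it
theorem pvAdj_getD (pairs : List (String × String)) (a : String) :
    (pvBuildAdj pairs).getD a [] = pvSlaves pairs a := by
  have hswap : pvBuildAdj pairs
      = (pairs.map (fun pr => (pr.2, pr.1))).foldl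
          (fun d p => d.modify p.1 [] (fun l => l ++ [p.2])) PySem.Dict.empty := by
    rw [List.foldl_map]
    rfl
  rw [hswap, PySem.Dict.getD_foldl_modify_append]
  simp only [PySem.Dict.getD_empty, List.nil_append, List.filter_map, List.map_map, pvSlaves]
  rfl

-- with the same fuel, A's queue-based loop and B's cursor-based loop walk the same states:
-- A's queue is always what lies beyond B's cursor in the growing output list
theorem pv_loops_eq (pairs : List (String × String)) :
    ∀ (fuel : Nat) (cadena : List String) (procesados : PySem.Set String) (i : Nat),
    i ≤ cadena.length →
    obtener_cadena_de_tragos_loop pairs cadena procesados (cadena.drop i) fuel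
      = obtener_cadena_de_tragos_alt_loop (pvBuildAdj pairs) cadena procesados i fuel := by
  intro fuel
  induction fuel with
  | zero =>
    intro cadena procesados i _
    rfl
  | succ fuel ih =>
    intro cadena procesados i hi
    by_cases h : i < cadena.length
    · rw [obtener_cadena_de_tragos_alt_loop, dif_pos h]
      have hdrop : cadena.drop i = cadena[i] :: cadena.drop (i + 1) :=
        List.drop_eq_getElem_cons h
      rw [hdrop, obtener_cadena_de_tragos_loop]
      simp only [pvFoldA, pvFoldB, pvAdj_getD]
      have hdrop2 : cadena.drop (i + 1) ++ pvNews (pvSlaves pairs cadena[i]) procesados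
          = (cadena ++ pvNews (pvSlaves pairs cadena[i]) procesados).drop (i + 1) :=
        (List.drop_append_of_le_length (by omega)).symm
      rw [hdrop2]
      exact ih _ _ (i + 1) (by simp only [List.length_append]; omega)
    · have hieq : i = cadena.length := by omega
      rw [obtener_cadena_de_tragos_alt_loop, dif_neg h, hieq, List.drop_length,
        obtener_cadena_de_tragos_loop]

-- ===== VERDICT (by name: the statement is the Claim_ definition above) =====
theorem obtener_cadena_de_tragos_spec : Claim_equal_obtener_cadena_de_tragos := by
  intro victima mascotas_dict _
  unfold Spec_obtener_cadena_de_tragos obtener_cadena_de_tragos obtener_cadena_de_tragos_alt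
  have h := pv_loops_eq mascotas_dict (mascotas_dict.length + 1)
    [victima] (PySem.Set.ofList [victima]) 0 (by simp)
  simpa using h
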